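-- pv_equiv track=rewrite | github.com/Foundup/Foundups-Agent | modules/communication/livechat/src/news_context_provider.py | _summarise_results
-- ===== SOURCE A (Python) =====
-- from typing import Dict, List, Optional, Any
--
-- MAX_NEWS_CONTEXT_CHARS = 600
--
-- def _summarise_results(results: List[Dict[str, str]], max_chars: int = MAX_NEWS_CONTEXT_CHARS) -> str:
--     """Condense news results into a compact text block for prompt injection."""
--     if not results:
--         return ""
--     lines = []
--     chars = 0
--     for r in results:
--         title = r.get("title", "")
--         body = r.get("body", "")
--         date = r.get("date", "")
--         # Prefer body (snippet), fall back to title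
--         snippet = body[:120] if body else title[:80]
--         if date:
--             line = f"- [{date[:10]}] {snippet}"
--         else:
--             line = f"- {snippet}"
--         if chars + len(line) > max_chars:
--             break
--         lines.append(line)
--         chars += len(line) + 1  # +1 for newline
--     return "\n".join(lines)
-- ===== SOURCE B (Python) =====
-- MAX_NEWS_CONTEXT_CHARS = 600
--
-- def _summarise_results(results, max_chars=MAX_NEWS_CONTEXT_CHARS):
--     """Prefix-sum + binary-search version: map every result to its line, build
--     the strictly increasing prefix-cost table (joined length + trailing +1 per
--     line), then binary-search the largest prefix whose cost fits the budget."""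
--     lines = []
--     for r in results:
--         body = r.get("body", "")
--         snippet = body[:120] if body else r.get("title", "")[:80]
--         date = r.get("date", "")
--         lines.append(f"- [{date[:10]}] {snippet}" if date else f"- {snippet}")
--     costs = []
--     total = 0
--     for line in lines:
--         total += len(line) + 1
--         costs.append(total)
--     # largest k with costs[k-1] <= max_chars + 1 (costs is strictly increasing)
--     lo, hi = 0, len(costs)
--     while lo < hi:
--         mid = (lo + hi) // 2
--         if costs[mid] <= max_chars + 1:
--             lo = mid + 1
--         else:
--             hi = mid
--     return "\n".join(lines[:lo])
-- ===== Notes on version B (the rewrite author's own statement) =====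
-- stated objective: alternative
-- what changed: A interleaves formatting and budget trimming in one break-on-overflow greedy loop; B first maps every result to its line, builds a strictly increasing prefix-cost table, and binary-searches it for the largest prefix that fits the budget before slicing and joining.
import Mathlib
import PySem

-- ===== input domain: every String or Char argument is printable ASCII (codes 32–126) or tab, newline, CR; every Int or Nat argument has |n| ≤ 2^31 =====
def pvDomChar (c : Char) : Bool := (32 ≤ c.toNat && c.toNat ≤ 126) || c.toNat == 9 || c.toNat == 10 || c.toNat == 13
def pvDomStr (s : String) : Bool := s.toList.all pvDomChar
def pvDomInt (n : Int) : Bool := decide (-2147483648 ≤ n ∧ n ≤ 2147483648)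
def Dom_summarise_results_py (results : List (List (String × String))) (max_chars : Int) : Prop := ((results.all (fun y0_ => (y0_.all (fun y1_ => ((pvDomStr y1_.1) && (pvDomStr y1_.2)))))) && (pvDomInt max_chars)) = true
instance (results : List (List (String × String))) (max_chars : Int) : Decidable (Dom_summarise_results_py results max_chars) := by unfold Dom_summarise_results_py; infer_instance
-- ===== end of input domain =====

-- B replaces A's single break-on-overflow greedy loop by map-to-lines + prefix-cost table + binary search; return value only.

-- ===== PORT A =====
-- r.get(k, "") on the association list (first match, as the dict convention states)
def pyGetStr (r : List (String × String)) (k : String) : String :=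
  ((r.find? (fun p => p.1 == k)).map (·.2)).getD ""

-- the for-loop of A: carries accumulated lines and the running chars total, breaks on overflow
def summariseLoopA (rs : List (List (String × String))) (max_chars : Int)
    (chars : Int) (lines : List String) : List String :=
  match rs with
  | [] => lines
  | r :: rest =>
      let title := pyGetStr r "title"
      let body := pyGetStr r "body"
      let date := pyGetStr r "date"
      let snippet := if body ≠ "" then PySem.Str.slice body none (some 120) else PySem.Str.slice title none (some 80)
      let line := if date ≠ "" then "- [" ++ PySem.Str.slice date none (some 10) ++ "] " ++ snippet else "- " ++ snippet
      if chars + PySem.Str.len line > max_chars then lines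
      else summariseLoopA rest max_chars (chars + PySem.Str.len line + 1) (lines ++ [line])

def summarise_results_py (results : List (List (String × String))) (max_chars : Int) : String :=
  if results = [] then ""
  else PySem.Str.join "\n" (summariseLoopA results max_chars 0 [])

-- ===== PORT B =====
-- the line B appends for one result r
def candLine (r : List (String × String)) : String :=
  let body := pyGetStr r "body"
  let snippet := if body ≠ "" then PySem.Str.slice body none (some 120) else PySem.Str.slice (pyGetStr r "title") none (some 80)
  let date := pyGetStr r "date"
  if date ≠ "" then "- [" ++ PySem.Str.slice date none (some 10) ++ "] " ++ snippet else "- " ++ snippet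

-- the prefix-cost loop: costs[k-1] = sum of len(line)+1 over the first k lines
def buildCosts (lines : List String) (total : Int) : List Int :=
  match lines with
  | [] => []
  | l :: rest => (total + PySem.Str.len l + 1) :: buildCosts rest (total + PySem.Str.len l + 1)

-- the while-loop binary search; costs[mid] is always in range since lo < hi ≤ costs.length (getD is exact there)
def bsearch (costs : List Int) (t : Int) (lo hi : Nat) : Nat :=
  if _h : lo < hi then
    let mid := (lo + hi) / 2
    if costs.getD mid 0 ≤ t then bsearch costs t (mid + 1) hi
    else bsearch costs t lo mid
  else lo
termination_by hi - lo
decreasing_by all_goals omega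

def summarise_results_py_alt (results : List (List (String × String))) (max_chars : Int) : String :=
  let lines := results.map candLine
  let costs := buildCosts lines 0
  let lo := bsearch costs (max_chars + 1) 0 costs.length
  PySem.Str.join "\n" (lines.take lo)

-- ===== PRECONDITION & SPEC =====
def Spec_summarise_results_py (results : List (List (String × String))) (max_chars : Int) (out : String) : Prop := out = summarise_results_py_alt results max_chars
instance (results : List (List (String × String))) (max_chars : Int) (out : String) : Decidable (Spec_summarise_results_py results max_chars out) := by unfold Spec_summarise_results_py; infer_instance

-- ===== CLAIM (what is proved, stated in full; the proofs are below) =====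
def Claim_equal_summarise_results_py : Prop := ∀ (results : List (List (String × String))) (max_chars : Int), Dom_summarise_results_py results max_chars → Spec_summarise_results_py results max_chars (summarise_results_py results max_chars)

-- ===== LEMMAS AND PROOFS =====

-- proof-side reference count: the number of lines A's loop keeps, with remaining budget b
def keepCount (cand : List String) (b : Int) : Nat :=
  match cand with
  | [] => 0
  | line :: rest =>
      if PySem.Str.len line > b then 0
      else 1 + keepCount rest (b - (PySem.Str.len line + 1))

-- characterisation predicate: r is THE cut point of costs at threshold t
def CutAt (costs : List Int) (t : Int) (r : Nat) : Prop :=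
  r ≤ costs.length ∧ (∀ i, i < r → costs.getD i 0 ≤ t) ∧ (r < costs.length → t < costs.getD r 0)

lemma cutAt_unique (costs : List Int) (t : Int) {r r' : Nat}
    (h : CutAt costs t r) (h' : CutAt costs t r') : r = r' := by
  rcases h with ⟨hr, hle, hgt⟩
  rcases h' with ⟨hr', hle', hgt'⟩
  rcases Nat.lt_trichotomy r r' with hlt | heq | hlt
  · have := hle' r hlt
    have := hgt (lt_of_lt_of_le hlt hr')
    omega
  · exact heq
  · have := hle r' hlt
    have := hgt' (lt_of_lt_of_le hlt hr)
    omega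

lemma buildCosts_length (lines : List String) (total : Int) :
    (buildCosts lines total).length = lines.length := by
  induction lines generalizing total with
  | nil => rfl
  | cons l rest ih => simp [buildCosts, ih]

lemma buildCosts_gt (lines : List String) (total : Int) :
    ∀ x ∈ buildCosts lines total, total < x := by
  induction lines generalizing total with
  | nil => simp [buildCosts]
  | cons l rest ih =>
      intro x hx
      simp only [buildCosts, List.mem_cons] at hx
      have hlen := PySem.Str.len_eq l
      rcases hx with rfl | hx
      · omega
      · have := ih (total + PySem.Str.len l + 1) x hx; omega

lemma buildCosts_getD_gt (lines : List String) (total : Int) :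
    ∀ j, j < (buildCosts lines total).length → total < (buildCosts lines total).getD j 0 := by
  intro j hj
  have hm : (buildCosts lines total).getD j 0 ∈ buildCosts lines total := by
    rw [List.getD_eq_getElem _ _ hj]
    exact List.getElem_mem hj
  exact buildCosts_gt lines total _ hm

-- costs is (strictly) increasing: getD is monotone on in-range indices
lemma buildCosts_mono (lines : List String) (total : Int) :
    ∀ i j, i ≤ j → j < (buildCosts lines total).length →
      (buildCosts lines total).getD i 0 ≤ (buildCosts lines total).getD j 0 := by
  induction lines generalizing total with
  | nil => intro i j _ hj; simp [buildCosts] at hj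
  | cons l rest ih =>
      intro i j hij hj
      simp only [buildCosts, List.length_cons] at hj ⊢
      have hlen := PySem.Str.len_eq l
      match i, j with
      | 0, 0 => simp
      | 0, j + 1 =>
          simp only [List.getD_cons_zero, List.getD_cons_succ]
          have := buildCosts_getD_gt rest (total + PySem.Str.len l + 1) j
            (by rw [buildCosts_length] at hj ⊢; omega)
          omega
      | i + 1, j + 1 =>
          simp only [List.getD_cons_succ]
          exact ih (total + PySem.Str.len l + 1) i j (by omega) (by omega)
      | i + 1, 0 => exact absurd hij (by omega)

-- the binary search lands on the cut point of a monotone costs list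
lemma bsearch_cutAt (costs : List Int) (t : Int)
    (hmono : ∀ i j, i ≤ j → j < costs.length → costs.getD i 0 ≤ costs.getD j 0) :
    ∀ lo hi, lo ≤ hi → hi ≤ costs.length →
      (∀ i, i < lo → costs.getD i 0 ≤ t) →
      (∀ i, hi ≤ i → i < costs.length → t < costs.getD i 0) →
      CutAt costs t (bsearch costs t lo hi) := by
  intro lo hi
  induction hn : hi - lo using Nat.strong_induction_on generalizing lo hi with
  | _ n ih =>
    intro hlohi hhi hlow hhigh
    unfold bsearch
    by_cases h : lo < hi
    · rw [dif_pos h]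
      set mid := (lo + hi) / 2 with hmid
      have hmlo : lo ≤ mid := by omega
      have hmhi : mid < hi := by omega
      by_cases hc : costs.getD mid 0 ≤ t
      · rw [if_pos hc]
        exact ih (hi - (mid + 1)) (by omega) (mid + 1) hi rfl (by omega) hhi
          (fun i hi' => le_trans (hmono i mid (by omega) (by omega)) hc) hhigh
      · rw [if_neg hc]
        exact ih (mid - lo) (by omega) lo mid rfl hmlo (by omega) hlow
          (fun i h1 h2 => lt_of_lt_of_le (by omega : t < costs.getD mid 0) (hmono mid i h1 h2))
    · rw [dif_neg h]
      have heq : lo = hi := by omega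
      refine ⟨heq ▸ hhi, hlow, ?_⟩
      intro hlt
      exact hhigh lo (by omega) hlt

-- A's kept count is the cut point of the prefix-cost table
lemma keepCount_cutAt (cand : List String) (b total : Int) :
    CutAt (buildCosts cand total) (total + b + 1) (keepCount cand b) := by
  induction cand generalizing b total with
  | nil => exact ⟨by simp [buildCosts, keepCount], by simp [keepCount], by simp [buildCosts]⟩
  | cons l rest ih =>
      have hlen := PySem.Str.len_eq l
      simp only [keepCount, buildCosts]
      by_cases h : PySem.Str.len l > b
      · rw [if_pos h]
        refine ⟨by simp, by omega, fun _ => ?_⟩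
        simp only [List.getD_cons_zero]
        omega
      · rw [if_neg h]
        rcases ih (b - (PySem.Str.len l + 1)) (total + PySem.Str.len l + 1) with ⟨h1, h2, h3⟩
        refine ⟨?_, ?_, ?_⟩
        · simp only [List.length_cons]; omega
        · intro i hi
          match i with
          | 0 => simp only [List.getD_cons_zero]; omega
          | i + 1 =>
              simp only [List.getD_cons_succ]
              have := h2 i (by omega)
              omega
        · intro hlt
          simp only [List.length_cons] at hlt
          rw [Nat.add_comm 1 (keepCount rest (b - (PySem.Str.len l + 1)))]
          simp only [List.getD_cons_succ]
          have := h3 (by omega)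
          omega

-- A's loop appends exactly the first keepCount candidate lines
lemma summariseLoopA_eq (rs : List (List (String × String))) (max_chars : Int) :
    ∀ (chars : Int) (lines : List String),
      summariseLoopA rs max_chars chars lines =
        lines ++ (rs.map candLine).take (keepCount (rs.map candLine) (max_chars - chars)) := by
  induction rs with
  | nil => intro chars lines; simp [summariseLoopA, keepCount]
  | cons r rest ih =>
      intro chars lines
      simp only [summariseLoopA, List.map_cons]
      set L := candLine r with hL
      rw [show (let title := pyGetStr r "title";
            let body := pyGetStr r "body";
            let date := pyGetStr r "date";
            let snippet := if body ≠ "" then PySem.Str.slice body none (some 120) else PySem.Str.slice title none (some 80);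
            if date ≠ "" then "- [" ++ PySem.Str.slice date none (some 10) ++ "] " ++ snippet else "- " ++ snippet) = L from rfl]
      simp only [keepCount]
      by_cases h : chars + PySem.Str.len L > max_chars
      · rw [if_pos h, if_pos (by omega)]
        simp
      · rw [if_neg h, if_neg (by omega), ih,
            show max_chars - chars - (PySem.Str.len L + 1) = max_chars - (chars + PySem.Str.len L + 1) from by omega,
            Nat.add_comm 1 _, List.take_succ_cons]
        simp

-- ===== VERDICT (by name: the statement is the Claim_ definition above) =====
theorem summarise_results_py_spec : Claim_equal_summarise_results_py := by
  intro results max_chars _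
  unfold Spec_summarise_results_py summarise_results_py summarise_results_py_alt
  rcases results with _ | ⟨r, rest⟩
  · simp [List.take_nil]
    rfl
  · have hbs : bsearch (buildCosts ((r :: rest).map candLine) 0) (max_chars + 1) 0
        (buildCosts ((r :: rest).map candLine) 0).length
      = keepCount ((r :: rest).map candLine) max_chars := by
      refine cutAt_unique _ (max_chars + 1)
        (bsearch_cutAt _ _ (buildCosts_mono _ _) 0 _ (Nat.zero_le _) le_rfl
          (by omega) (fun i h1 h2 => absurd h1 (by omega))) ?_
      have := keepCount_cutAt ((r :: rest).map candLine) max_chars 0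
      simpa using this
    rw [if_neg (by simp), summariseLoopA_eq]
    simp only [List.nil_append, sub_zero, hbs]
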